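-- pv_equiv track=rewrite | github.com/geometric-kernels/GeometricKernels | scripts/save_grassmanian_zsf.py | generate_sub_partitions
-- ===== SOURCE A (Python) =====
-- def generate_sub_partitions(kappa):
--     kappa_len = len(kappa)
--
--     if kappa_len == 0:
--         return [tuple()]
--
--     results = []
--     current_sigma_parts = [0] * kappa_len
--
--     def _build_recursively(part_idx, prev_part_max_val):
--         if part_idx == kappa_len:
--             results.append(tuple(current_sigma_parts))
--             return
--
--         current_part_upper_bound = min(prev_part_max_val, kappa[part_idx])
--
--         for val in range(current_part_upper_bound, -1, -1):
--             current_sigma_parts[part_idx] = val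
--             _build_recursively(part_idx + 1, val)
--
--     _build_recursively(0, kappa[0])
--     results = [tuple(x for x in result if x != 0) for result in results]
--     return results
-- ===== SOURCE B (Python) =====
-- def generate_sub_partitions(kappa):
--     # Iterative worklist instead of recursion over a shared mutable array.
--     partials = [()]
--     for bound in kappa:
--         partials = [p + (v,)
--                     for p in partials
--                     for v in range(min(p[-1] if p else kappa[0], bound), -1, -1)]
--     return [tuple(x for x in p if x != 0) for p in partials]
-- ===== Notes on version B (the rewrite author's own statement) =====
-- stated objective: alternative
-- what changed: Replaces the nested recursion writing into a shared mutable array (with a results accumulator) by a breadth-first worklist: one fold over kappa that extends every partial tuple by all admissible next values.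
import Mathlib
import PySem

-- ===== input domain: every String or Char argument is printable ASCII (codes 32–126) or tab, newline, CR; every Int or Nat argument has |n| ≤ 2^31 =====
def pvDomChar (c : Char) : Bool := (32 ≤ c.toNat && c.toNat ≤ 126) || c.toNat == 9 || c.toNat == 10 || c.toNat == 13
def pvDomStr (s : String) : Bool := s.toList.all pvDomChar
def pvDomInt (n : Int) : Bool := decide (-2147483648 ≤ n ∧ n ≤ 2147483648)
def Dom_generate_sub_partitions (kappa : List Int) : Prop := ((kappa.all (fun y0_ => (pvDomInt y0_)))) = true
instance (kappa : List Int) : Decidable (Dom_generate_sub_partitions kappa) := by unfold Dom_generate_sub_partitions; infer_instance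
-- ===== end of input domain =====

-- B replaces A's recursion over a shared mutable array by a single worklist fold over kappa (same cost, different decomposition).

-- ===== PORT A =====
-- _build_recursively: fuel = kappa_len - part_idx makes the recursion structural; the
-- state is (current_sigma_parts, results).  kappa[part_idx] is always in range (getD 0 is exact here).
def pvBuildA (kappa : List Int) : Nat → Nat → Int → List Int × List (List Int) → List Int × List (List Int)
  | 0, _, _, st => (st.1, st.2 ++ [st.1])
  | fuel+1, partIdx, prev, st =>
    (PySem.List.pyRange (min prev (kappa.getD partIdx 0)) (-1) (-1)).foldl
      (fun st val => pvBuildA kappa fuel (partIdx+1) val (st.1.set partIdx val, st.2)) st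

def generate_sub_partitions (kappa : List Int) : List (List Int) :=
  if kappa.length = 0 then [[]]
  else
    ((pvBuildA kappa kappa.length 0 (kappa.getD 0 0)
        (List.replicate kappa.length 0, [])).2).map (fun r => r.filter (fun x => x != 0))

-- ===== PORT B =====
def generate_sub_partitions_alt (kappa : List Int) : List (List Int) :=
  -- p.getLastD (kappa.getD 0 0) = p[-1] if p else kappa[0] (kappa[0] only read when kappa ≠ [])
  (kappa.foldl
      (fun partials bound =>
        partials.flatMap (fun p =>
          (PySem.List.pyRange (min (p.getLastD (kappa.getD 0 0)) bound) (-1) (-1)).map (fun v => p ++ [v])))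
      [[]]).map (fun p => p.filter (fun x => x != 0))

-- ===== PRECONDITION & SPEC =====
def Spec_generate_sub_partitions (kappa : List Int) (out : List (List Int)) : Prop := out = generate_sub_partitions_alt kappa
instance (kappa : List Int) (out : List (List Int)) : Decidable (Spec_generate_sub_partitions kappa out) := by unfold Spec_generate_sub_partitions; infer_instance

-- ===== CLAIM (what is proved, stated in full; the proofs are below) =====
def Claim_equal_generate_sub_partitions : Prop := ∀ (kappa : List Int), Dom_generate_sub_partitions kappa → Spec_generate_sub_partitions kappa (generate_sub_partitions kappa)

-- ===== LEMMAS AND PROOFS =====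

-- Common abstraction: all non-increasing extensions bounded componentwise by `bounds`, first part ≤ prev.
def pvExts : List Int → Int → List (List Int)
  | [], _ => [[]]
  | b :: bs, prev =>
    (PySem.List.pyRange (min prev b) (-1) (-1)).flatMap (fun v => (pvExts bs v).map (fun t => v :: t))

lemma take_set_self (l : List Int) (i : Nat) (v : Int) : (l.set i v).take i = l.take i := by
  apply List.ext_getElem <;> simp [List.getElem_set]
  omega

lemma take_succ_set (l : List Int) (i : Nat) (v : Int) (h : i < l.length) :
    (l.set i v).take (i+1) = l.take i ++ [v] := by
  rw [List.take_add_one, take_set_self]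
  simp [h]

lemma pvBuildA_spec (kappa : List Int) :
    ∀ (fuel partIdx : Nat) (prev : Int) (cur : List Int) (acc : List (List Int)),
    cur.length = kappa.length → kappa.length = partIdx + fuel →
    (pvBuildA kappa fuel partIdx prev (cur, acc)).2
        = acc ++ (pvExts (kappa.drop partIdx) prev).map (fun t => cur.take partIdx ++ t)
    ∧ (pvBuildA kappa fuel partIdx prev (cur, acc)).1.length = cur.length
    ∧ (pvBuildA kappa fuel partIdx prev (cur, acc)).1.take partIdx = cur.take partIdx := by
  intro fuel
  induction fuel with
  | zero =>
    intro partIdx prev cur acc hlen hidx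
    have hdrop : kappa.drop partIdx = [] := by
      apply List.drop_eq_nil_of_le; omega
    have : cur.take partIdx = cur := by
      apply List.take_of_length_le; omega
    simp [pvBuildA, pvExts, hdrop, this]
  | succ fuel ih =>
    intro partIdx prev cur acc hlen hidx
    have hlt : partIdx < kappa.length := by omega
    have hgetD : kappa.getD partIdx 0 = kappa[partIdx] := List.getD_eq_getElem _ _ hlt
    have hdrop : kappa.drop partIdx = kappa[partIdx] :: kappa.drop (partIdx+1) :=
      List.drop_eq_getElem_cons hlt
    -- inner induction over the countdown range list
    have main : ∀ (L : List Int) (cur : List Int) (acc : List (List Int)),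
        cur.length = kappa.length →
        (L.foldl (fun st val => pvBuildA kappa fuel (partIdx+1) val (st.1.set partIdx val, st.2)) (cur, acc)).2
            = acc ++ L.flatMap (fun v => (pvExts (kappa.drop (partIdx+1)) v).map
                (fun t => cur.take partIdx ++ v :: t))
        ∧ (L.foldl (fun st val => pvBuildA kappa fuel (partIdx+1) val (st.1.set partIdx val, st.2)) (cur, acc)).1.length = cur.length
        ∧ (L.foldl (fun st val => pvBuildA kappa fuel (partIdx+1) val (st.1.set partIdx val, st.2)) (cur, acc)).1.take partIdx = cur.take partIdx := by
      intro L
      induction L with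
      | nil => intro cur acc hlen; simp
      | cons v L ihL =>
        intro cur acc hlen
        have hcur : partIdx < cur.length := by omega
        obtain ⟨h2, h1, htake⟩ := ih (partIdx+1) v (cur.set partIdx v) acc (by simpa using hlen)
          (by omega)
        set st' := pvBuildA kappa fuel (partIdx+1) v (cur.set partIdx v, acc) with hst'
        have htake1 : (cur.set partIdx v).take (partIdx+1) = cur.take partIdx ++ [v] :=
          take_succ_set cur partIdx v hcur
        have hlen' : st'.1.length = cur.length := by simpa using h1
        have htake' : st'.1.take partIdx = cur.take partIdx := by
          have : st'.1.take partIdx = (st'.1.take (partIdx+1)).take partIdx := by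
            rw [List.take_take]; congr 1; omega
          rw [this, htake, htake1, List.take_append_of_le_length (by simp only [List.length_take]; omega)]
          exact List.take_of_length_le (by simp only [List.length_take]; omega)
        have hlenK : st'.1.length = kappa.length := hlen'.trans hlen
        obtain ⟨g2, g1, gtake⟩ := ihL st'.1 st'.2 hlenK
        simp only [Prod.mk.eta] at g2 g1 gtake
        refine ⟨?_, by simp only [List.foldl_cons, ← hst']; rw [g1, hlen'], ?_⟩
        · simp only [List.foldl_cons, ← hst']
          rw [g2, h2, htake1]
          simp [List.flatMap_cons, htake', List.append_assoc]
        · simp only [List.foldl_cons, ← hst']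
          rw [gtake, htake']
    simp only [pvBuildA, hgetD]
    obtain ⟨m2, m1, mtake⟩ := main (PySem.List.pyRange (min prev kappa[partIdx]) (-1) (-1)) cur acc hlen
    refine ⟨?_, m1, mtake⟩
    rw [m2, hdrop]
    simp [pvExts, List.map_flatMap, Function.comp_def]

lemma foldB_spec (k0 : Int) :
    ∀ (bs : List Int) (P : List (List Int)),
    bs.foldl (fun partials bound =>
        partials.flatMap (fun p =>
          (PySem.List.pyRange (min (p.getLastD k0) bound) (-1) (-1)).map (fun v => p ++ [v]))) P
      = P.flatMap (fun p => (pvExts bs (p.getLastD k0)).map (fun t => p ++ t)) := by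
  intro bs
  induction bs with
  | nil => intro P; simp only [List.foldl_nil, pvExts]; simp
  | cons b bs ih =>
    intro P
    rw [List.foldl_cons, ih, List.flatMap_assoc]
    congr 1
    funext p
    rw [List.flatMap_map]
    simp only [pvExts, List.map_flatMap]
    congr 1
    funext v
    simp [Function.comp_def, List.append_assoc]

-- ===== VERDICT (by name: the statement is the Claim_ definition above) =====
theorem generate_sub_partitions_spec : Claim_equal_generate_sub_partitions := by
  intro kappa _
  unfold Spec_generate_sub_partitions generate_sub_partitions generate_sub_partitions_alt
  cases kappa with
  | nil => decide
  | cons k ks =>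
    rw [if_neg (by simp)]
    obtain ⟨h2, -, -⟩ := pvBuildA_spec (k :: ks) (k :: ks).length 0 ((k :: ks).getD 0 0)
      (List.replicate (k :: ks).length 0) [] (by simp) (by simp)
    rw [h2, foldB_spec]
    simp
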